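-- pv_equiv track=rewrite | github.com/edt-yxz-zzd/python3_src | nn_ns/algo/sep_str.py | border_width_def
-- ===== SOURCE A (Python) =====
-- def border_width_def(s):
--     L = len(s)
--     assert L > 0
--     ls = []
--     for i in range(L, -1, -1):
--         if s[:i] == s[L-i:]: # since s[-0:] == s !!!
--             ls.append(i)
--     return tuple(ls)
-- ===== SOURCE B (Python) =====
-- def border_width_def(s):
--     # Incremental DP: extend the (descending) border list of each prefix by one character.
--     # On the empty string A raises AssertionError; this returns (0,) there.
--     ws = [0]
--     for i, c in enumerate(s):
--         ws = [k + 1 for k in ws if s[k] == c] + [0]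
--     return tuple(ws)
-- ===== Notes on version B (the rewrite author's own statement) =====
-- stated objective: alternative
-- what changed: Replaced A's quadratic scan that slices and compares every prefix/suffix pair with an incremental DP that extends the descending border list of each prefix by one character, so each surviving candidate width is checked with a single character comparison; Pre_ excludes only the empty string, on which A's 'assert L > 0' raises AssertionError (B returns (0,)).
import Mathlib
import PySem

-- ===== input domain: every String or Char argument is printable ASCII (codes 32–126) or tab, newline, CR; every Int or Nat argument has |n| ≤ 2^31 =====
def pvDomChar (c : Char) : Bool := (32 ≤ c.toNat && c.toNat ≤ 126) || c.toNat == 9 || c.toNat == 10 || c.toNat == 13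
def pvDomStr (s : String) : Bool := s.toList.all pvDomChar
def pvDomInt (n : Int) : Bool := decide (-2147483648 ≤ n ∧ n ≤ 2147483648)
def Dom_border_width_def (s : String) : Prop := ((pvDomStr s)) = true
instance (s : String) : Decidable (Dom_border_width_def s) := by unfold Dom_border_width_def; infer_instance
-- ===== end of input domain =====

-- B replaces A's quadratic slice-comparison scan with an incremental DP over prefixes
-- (extending the descending border list one character at a time); return value only.

-- ===== PORT A =====
def border_width_def (s : String) : List Int :=
  let L : Int := PySem.Str.len s
  (PySem.List.pyRange L (-1) (-1)).foldl
    (fun ls i =>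
      if PySem.Str.slice s none (some i) == PySem.Str.slice s (some (L - i)) none
      then ls ++ [i] else ls) []

-- ===== PORT B =====
def border_width_def_alt (s : String) : List Int :=
  (PySem.List.enumerate s.toList 0).foldl
    (fun ws p =>
      ((ws.filter (fun k => PySem.Str.pyGet? s k == some p.2)).map (· + 1)) ++ [0])
    [0]

-- ===== PRECONDITION & SPEC =====
-- Pre_ excludes only the empty string, on which A's 'assert L > 0' raises AssertionError.
def Pre_border_width_def (s : String) : Prop := s ≠ ""
instance (s : String) : Decidable (Pre_border_width_def s) := by unfold Pre_border_width_def; infer_instance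
def pvWitness_border_width_def : String := "aba"

def Spec_border_width_def (s : String) (out : List Int) : Prop := out = border_width_def_alt s
instance (s : String) (out : List Int) : Decidable (Spec_border_width_def s out) := by unfold Spec_border_width_def; infer_instance

-- ===== CLAIM (what is proved, stated in full; the proofs are below) =====
def Claim_equal_border_width_def : Prop := ∀ (s : String), Dom_border_width_def s → Pre_border_width_def s → Spec_border_width_def s (border_width_def s)

-- ===== LEMMAS AND PROOFS =====

-- k is a border width of cs: the prefix of length k equals the suffix of length k
def isB (cs : List Char) (k : Nat) : Bool := decide (cs.take k = cs.drop (cs.length - k))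

-- all border widths of cs, descending, as Nats
def bListN (cs : List Char) : List Nat := ((List.range (cs.length + 1)).filter (isB cs)).reverse

def bList (cs : List Char) : List Int := (bListN cs).map Int.ofNat

-- extending the string by one char: k+1 is a border width of t++[c] iff
-- k is a border width of t and (t++[c])[k] = c
theorem isB_append (t : List Char) (c : Char) (k : Nat) (hk : k ≤ t.length) :
    isB (t ++ [c]) (k + 1) = (isB t k && ((t ++ [c])[k]? == some c)) := by
  unfold isB
  rcases Nat.lt_or_ge k t.length with hlt | hge
  · have h1 : (t ++ [c]).take (k+1) = t.take (k+1) := List.take_append_of_le_length (by omega)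
    have h2 : t.take (k+1) = t.take k ++ [t[k]'hlt] := by
      rw [List.take_add_one, List.getElem?_eq_getElem hlt]; rfl
    have h3 : (t ++ [c]).length - (k+1) = t.length - k := by
      simp only [List.length_append, List.length_cons, List.length_nil]; omega
    have h4 : (t ++ [c]).drop (t.length - k) = t.drop (t.length - k) ++ [c] :=
      List.drop_append_of_le_length (by omega)
    have h5 : (t ++ [c])[k]? = some t[k] := by
      rw [List.getElem?_append_left hlt, List.getElem?_eq_getElem hlt]
    rw [h1, h3, h4, h5, h2]
    have hlen1 : (t.take k).length = k := by simp; omega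
    have hlen2 : (t.drop (t.length - k)).length = k := by simp; omega
    rw [Bool.eq_iff_iff]
    simp only [decide_eq_true_eq, Bool.and_eq_true, beq_iff_eq, Option.some.injEq]
    constructor
    · intro h
      have := List.append_inj h (by rw [hlen1, hlen2])
      exact ⟨this.1, by have h8 := this.2; simp at h8; exact h8⟩
    · rintro ⟨h6, h7⟩; rw [h6, h7]
  · have hk' : k = t.length := by omega
    subst hk'
    simp

theorem bListN_append (t : List Char) (c : Char) :
    bListN (t ++ [c]) =
      ((bListN t).filter (fun j => (t ++ [c])[j]? == some c)).map (· + 1) ++ [0] := by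
  unfold bListN
  have hlen : (t ++ [c]).length = t.length + 1 := by simp
  rw [hlen]
  rw [List.range_succ_eq_map]
  rw [List.filter_cons]
  have h0 : isB (t ++ [c]) 0 = true := by simp [isB]
  rw [h0]
  simp only [List.filter_map]
  have hcongr : (List.range (t.length + 1)).filter (isB (t ++ [c]) ∘ Nat.succ)
      = (List.range (t.length + 1)).filter
          (fun j => isB t j && ((t ++ [c])[j]? == some c)) := by
    apply List.filter_congr
    intro j hj
    simp only [Function.comp_apply, Nat.succ_eq_add_one]
    exact isB_append t c j (by simpa using Nat.lt_succ_iff.mp (List.mem_range.mp hj))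
  rw [hcongr]
  simp only [if_true, List.reverse_cons, List.map_reverse, List.filter_reverse, List.filter_filter]
  rw [show (fun j => isB t j && ((t ++ [c])[j]? == some c))
        = (fun a => ((t ++ [c])[a]? == some c) && isB t a) from
      funext fun j => Bool.and_comm _ _]

theorem mem_bListN (t : List Char) (j : Nat) (hj : j ∈ bListN t) : j ≤ t.length := by
  unfold bListN at hj
  simp only [List.mem_reverse, List.mem_filter, List.mem_range] at hj
  omega

-- one step of B's fold turns the border list of take n into that of take (n+1)
theorem step_lem (s : String) (n : Nat) (hn : n < s.toList.length) :
    ((bList (s.toList.take n)).filter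
        (fun k => PySem.Str.pyGet? s k == some s.toList[n])).map (· + 1) ++ [0]
      = bList (s.toList.take (n + 1)) := by
  have ht : (s.toList.take n).length = n := by rw [List.length_take]; omega
  have htake : s.toList.take (n+1) = s.toList.take n ++ [s.toList[n]] := by
    rw [List.take_add_one, List.getElem?_eq_getElem hn]; rfl
  unfold bList
  have hfil : ((bListN (s.toList.take n)).filter
        ((fun k : Int => PySem.Str.pyGet? s k == some s.toList[n]) ∘ Int.ofNat))
      = (bListN (s.toList.take n)).filter
          (fun j => (s.toList.take n ++ [s.toList[n]])[j]? == some s.toList[n]) := by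
    apply List.filter_congr
    intro j hj
    have hjn : j ≤ n := ht ▸ mem_bListN _ j hj
    have h1 : (s.toList.take n ++ [s.toList[n]])[j]? = s.toList[j]? := by
      rw [← htake, List.getElem?_take]
      simp [Nat.lt_succ_iff.mpr hjn]
    simp only [Function.comp_apply, Int.ofNat_eq_natCast, PySem.Str.pyGet?_natCast, h1]
  rw [htake, bListN_append, List.map_append, List.filter_map, List.map_map, List.map_map, hfil]
  congr 1

-- B's fold over the remaining characters, with the invariant state
theorem fold_b (s : String) (ts : List Char) :
    ∀ n : Nat, s.toList.drop n = ts →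
      (PySem.List.enumerate ts (n : Int)).foldl
        (fun ws p => ((ws.filter (fun k => PySem.Str.pyGet? s k == some p.2)).map (· + 1)) ++ [0])
        (bList (s.toList.take n))
      = bList s.toList := by
  induction ts with
  | nil =>
    intro n h
    rw [PySem.List.enumerate_nil, List.foldl_nil,
        List.take_of_length_le (List.drop_eq_nil_iff.mp h)]
  | cons c ts ih =>
    intro n h
    have hn : n < s.toList.length := by
      by_contra hc
      rw [List.drop_eq_nil_iff.mpr (by omega)] at h
      exact List.cons_ne_nil c ts h.symm
    have hsplit := List.drop_eq_getElem_cons hn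
    rw [h] at hsplit
    have hc' : s.toList[n] = c := (List.cons.injEq _ _ _ _ ▸ hsplit.symm).1
    have hdrop : s.toList.drop (n+1) = ts := (List.cons.injEq _ _ _ _ ▸ hsplit.symm).2
    rw [PySem.List.enumerate_cons, List.foldl_cons]
    have hstep := step_lem s n hn
    rw [hc'] at hstep
    rw [hstep]
    have hcast : (n : Int) + 1 = ((n + 1 : Nat) : Int) := by push_cast; ring
    rw [hcast]
    exact ih (n+1) hdrop

theorem lem_b (s : String) : border_width_def_alt s = bList s.toList := by
  have h := fold_b s s.toList 0 (by simp)
  simpa [border_width_def_alt] using h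

theorem lem_a (s : String) : border_width_def s = bList s.toList := by
  have hL : PySem.Str.len s = (s.toList.length : Int) := by simp
  unfold border_width_def
  rw [PySem.List.foldl_append_if_eq_filter
        (fun i => PySem.Str.slice s none (some i) == PySem.Str.slice s (some (PySem.Str.len s - i)) none)]
  rw [List.nil_append, hL]
  rw [PySem.List.pyRange_neg_one_eq_reverse]
  have h01 : (-1 : Int) + 1 = 0 := by norm_num
  rw [h01]
  rw [List.filter_reverse]
  rw [PySem.List.pyRange_one]
  have htn : ((s.toList.length : Int) + 1 - 0).toNat = s.toList.length + 1 := by omega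
  rw [htn]
  rw [List.filter_map]
  have hfil : ((List.range (s.toList.length + 1)).filter
        ((fun i => PySem.Str.slice s none (some i) == PySem.Str.slice s (some ((s.toList.length : Int) - i)) none)
          ∘ (fun k : Nat => (0 : Int) + k)))
      = (List.range (s.toList.length + 1)).filter (isB s.toList) := by
    apply List.filter_congr
    intro k hk
    have hk' : k ≤ s.toList.length := Nat.lt_succ_iff.mp (List.mem_range.mp hk)
    simp only [Function.comp_apply, zero_add]
    rw [Bool.eq_iff_iff]
    simp only [beq_iff_eq, isB, decide_eq_true_eq]
    rw [← String.toList_inj]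
    rw [PySem.Str.toList_slice, PySem.Str.toList_slice]
    rw [PySem.Chars.slice_eq_listSlice, PySem.Chars.slice_eq_listSlice]
    rw [PySem.List.slice_to_natCast]
    rw [PySem.List.slice_from s.toList (by omega)]
    have : ((s.toList.length : Int) - (k : Int)).toNat = s.toList.length - k := by omega
    rw [this]
  rw [hfil]
  unfold bList bListN
  rw [List.map_reverse]
  congr 1
  apply List.map_congr_left
  intro x _
  simp

-- ===== VERDICT (by name: the statement is the Claim_ definition above) =====
theorem border_width_def_spec : Claim_equal_border_width_def := by
  intro s _ _
  unfold Spec_border_width_def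
  rw [lem_a, lem_b]
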